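/- GENERATED by c/gen_decode.py: decode facts of the image, one per distinct instruction byte string. -/
import UserX.DecodeImage

#decode_all Vorbis.Dec
  "01c3"  -- add ebx,eax
  "0f8285010000"  -- jb 102ad4
  "0f84c3010000"  -- je 114427
  "0f85e3020000"  -- jne 1149f3
  "0f8e6a010000"  -- jle 111000
  "0fb644241f"  -- movzx eax,BYTE PTR [rsp+0x1f]
  "29d9"  -- sub ecx,ebx
  "4080fdff"  -- cmp bpl,0xff
  "4129c5"  -- sub r13d,eax
  "4183e60f"  -- and r14d,0xf
  "4189dd"  -- mov r13d,ebx
  "41bc02000000"  -- mov r12d,0x2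
  "420fb71c73"  -- movzx ebx,WORD PTR [rbx+r14*2]
  "4429f2"  -- sub edx,r14d
  "44893c24"  -- mov DWORD PTR [rsp],r15d
  "4489bbe8060000"  -- mov DWORD PTR [rbx+0x6e8],r15d
  "448b742424"  -- mov r14d,DWORD PTR [rsp+0x24]
  "450fb62c24"  -- movzx r13d,BYTE PTR [r12]
  "4589c4"  -- mov r12d,r8d
  "460fb7bcb422010000"  -- movzx r15d,WORD PTR [rsp+r14*4+0x122]
  "4839d8"  -- cmp rax,rbx
  "486bdb38"  -- imul rbx,rbx,0x38
  "4883ec60"  -- sub rsp,0x60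
  "48898558ffffff"  -- mov QWORD PTR [rbp-0xa8],rax
  "488b4c2408"  -- mov rcx,QWORD PTR [rsp+0x8]
  "488bb3c8010000"  -- mov rsi,QWORD PTR [rbx+0x1c8]
  "488d5cd028"  -- lea rbx,[rax+rdx*8+0x28]
  "488d7d40"  -- lea rdi,[rbp+0x40]
  "488dbb98000000"  -- lea rdi,[rbx+0x98]
  "488dbdd0050000"  -- lea rdi,[rbp+0x5d0]
  "48c7442438c00f1200"  -- mov QWORD PTR [rsp+0x38],0x120fc0
  "490fafed"  -- imul rbp,r13
  "4989c5"  -- mov r13,rax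
  "498d7c2408"  -- lea rdi,[r12+0x8]
  "498dbcc6b8050000"  -- lea rdi,[r14+rax*8+0x5b8]
  "4a8d3cad80061200"  -- lea rdi,[r13*4+0x120680]
  "4c037b08"  -- add r15,QWORD PTR [rbx+0x8]
  "4c897cc308"  -- mov QWORD PTR [rbx+rax*8+0x8],r15
  "4c8b742440"  -- mov r14,QWORD PTR [rsp+0x40]
  "4c8d7cd028"  -- lea r15,[rax+rdx*8+0x28]
  "4d89e9"  -- mov r9,r13
  "4f8d7cb508"  -- lea r15,[r13+r14*4+0x8]
  "66410f6ec6"  -- movd xmm0,r14d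
  "664689a4ac22010000"  -- mov WORD PTR [rsp+r13*4+0x122],r12w
  "740c"  -- je 101dc0
  "74c4"  -- je 10b219
  "7625"  -- jbe 1023bd
  "7d54"  -- jge 1045d2
  "7f73"  -- jg 10d26c
  "8344241001"  -- add DWORD PTR [rsp+0x10],0x1
  "83fdff"  -- cmp ebp,0xffffffff
  "895d00"  -- mov DWORD PTR [rbp+0x0],ebx
  "89d1"  -- mov ecx,edx
  "8b4c2450"  -- mov ecx,DWORD PTR [rsp+0x50]
  "8b8548ffffff"  -- mov eax,DWORD PTR [rbp-0xb8]
  "99"  -- cdq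
  "c1e010"  -- shl eax,0x10
  "c7800800c00000000000"  -- mov DWORD PTR [rax+0xc00008],0x0
  "d1ef"  -- shr edi,1
  "e807fefeff"  -- call 103d00
  "e811b3feff"  -- call 1003c0
  "e81bc0feff"  -- call 100640
  "e82553ffff"  -- call 100640
  "e82dfdffff"  -- call 107500
  "e838b9feff"  -- call 100300
  "e843e0feff"  -- call 103d00
  "e84dadfeff"  -- call 100480
  "e858f3feff"  -- call 100480
  "e8670dffff"  -- call 103d00
  "e871b7feff"  -- call 101520
  "e87bc4feff"  -- call 1003c0
  "e887fcffff"  -- call 107500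
  "e891fdffff"  -- call 107500
  "e89bd3ffff"  -- call 100720
  "e8a6bcfeff"  -- call 100300
  "e8b061ffff"  -- call 10c1a0
  "e8ba3dffff"  -- call 100640
  "e8c470ffff"  -- call 100720
  "e8cdbefeff"  -- call 1008e0
  "e8d8fefeff"  -- call 103d00
  "e8e1bffeff"  -- call 1008e0
  "e8ebc2feff"  -- call 1008e0
  "e8f467ffff"  -- call 100720
  "e8ffd6feff"  -- call 103d00
  "e941f1ffff"  -- jmp 113b22
  "e990060000"  -- jmp 1112d4
  "e9e3fcffff"  -- jmp 113b22
  "eb54"  -- jmp 10e44f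
  "ebd3"  -- jmp 10c345
  "f20f2cd8"  -- cvttsd2si ebx,xmm0
  "f20f5cce"  -- subsd xmm1,xmm6
  "f30f104bc8"  -- movss xmm1,DWORD PTR [rbx-0x38]
  "f30f106db0"  -- movss xmm5,DWORD PTR [rbp-0x50]
  "f30f114c2438"  -- movss DWORD PTR [rsp+0x38],xmm1
  "f30f116df8"  -- movss DWORD PTR [rbp-0x8],xmm5
  "f30f5875a4"  -- addss xmm6,DWORD PTR [rbp-0x5c]
  "f30f59cb"  -- mulss xmm1,xmm3
  "f30f5cf8"  -- subss xmm7,xmm0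
  "f3410f116d08"  -- movss DWORD PTR [r13+0x8],xmm5
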